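-- pv_equiv track=rewrite | github.com/ppegolo/uqphonon | src/uqphonon/_core.py | _parse_path_string
-- ===== SOURCE A (Python) =====
-- def _parse_path_string(path_str: str, known_names=None) -> list[list[str]]:
--     """Convert an ASE band path string to a list of segments.
--
--     Handles three formats:
--     - Compact user: 'GMKG|ALHA'  (| = segment break, each char = point)
--     - Explicit user: 'G,M,K|G,A' (| = segment break, , = point separator)
--     - ASE auto-detect: 'GXWK,GLUWLK' (, = segment break, each char = point)
--
--     When *known_names* (a set of point names) is provided, multi-character
--     point names such as ``B_1`` or ``GAMMA`` are matched greedily.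
--     """
--     if "|" in path_str:
--         raw_segments = path_str.split("|")
--         if "," in path_str:
--             return [seg.split(",") for seg in raw_segments]
--         return [list(seg) for seg in raw_segments]
--     elif "," in path_str:
--         # ASE format: comma separates disconnected segments
--         raw_segments = path_str.split(",")
--         return [_tokenize_segment(seg, known_names) for seg in raw_segments]
--     else:
--         return [_tokenize_segment(path_str, known_names)]
--
-- def _tokenize_segment(seg: str, known_names=None) -> list[str]:
--     """Split a segment string into point names.
--
--     When *known_names* is given, uses greedy longest-match against the
--     known point names (handles multi-character names like ``B_1``).
--     Falls back to character-by-character splitting otherwise.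
--     """
--     if not known_names or all(len(n) == 1 for n in known_names):
--         return list(seg)
--
--     # Greedy longest-match tokenizer
--     names_by_length = sorted(known_names, key=len, reverse=True)
--     result = []
--     i = 0
--     while i < len(seg):
--         matched = False
--         for name in names_by_length:
--             if seg[i:].startswith(name):
--                 result.append(name)
--                 i += len(name)
--                 matched = True
--                 break
--         if not matched:
--             # Skip unexpected characters (shouldn't happen with valid paths)
--             result.append(seg[i])
--             i += 1
--     return result
-- ===== SOURCE B (Python) =====
-- def _parse_path_string(path_str, known_names=None):
--     if "|" in path_str:
--         raw_segments = path_str.split("|")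
--         if "," in path_str:
--             return [seg.split(",") for seg in raw_segments]
--         return [list(seg) for seg in raw_segments]
--     segments = path_str.split(",") if "," in path_str else [path_str]
--     if not known_names:
--         return [list(seg) for seg in segments]
--     names = set(known_names)
--     maxlen = max(len(n) for n in names)
--     out = []
--     for seg in segments:
--         tokens = []
--         i = 0
--         L = len(seg)
--         while i < L:
--             for l in range(min(maxlen, L - i), 0, -1):
--                 if seg[i:i + l] in names:
--                     tokens.append(seg[i:i + l])
--                     i += l
--                     break
--             else:
--                 tokens.append(seg[i])
--                 i += 1
--         out.append(tokens)
--     return out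
-- ===== Notes on version B (the rewrite author's own statement) =====
-- stated objective: faster
-- what changed: Replaces A's per-position scan over the length-sorted known-name list (startswith each name) with a precomputed hash-set of names plus a single descending candidate-length loop bounded by the maximum name length, so the inner scan over all names disappears; A's all-length-1 shortcut and the sort disappear too, and the comma segment split is unified into one segments list.
-- outside the precondition, e.g. on _parse_path_string('AB', {'', 'AB'}): A returns [['AB']], B returns [['AB']]; on _parse_path_string('G,K', {'K', '', 'G'}): A returns [['G'], ['K']], B returns [['G'], ['K']]
import Mathlib
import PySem

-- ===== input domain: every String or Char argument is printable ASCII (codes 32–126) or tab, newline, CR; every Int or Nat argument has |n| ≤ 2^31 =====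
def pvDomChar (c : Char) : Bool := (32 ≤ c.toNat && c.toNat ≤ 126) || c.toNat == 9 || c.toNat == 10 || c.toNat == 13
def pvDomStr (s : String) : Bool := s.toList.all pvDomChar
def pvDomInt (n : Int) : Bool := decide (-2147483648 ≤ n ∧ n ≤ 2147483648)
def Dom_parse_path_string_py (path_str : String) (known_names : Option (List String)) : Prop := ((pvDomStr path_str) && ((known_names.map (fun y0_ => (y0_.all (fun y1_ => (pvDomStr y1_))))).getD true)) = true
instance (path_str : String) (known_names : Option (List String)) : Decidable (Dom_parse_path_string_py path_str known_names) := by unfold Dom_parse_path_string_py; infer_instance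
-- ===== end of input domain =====

-- B replaces A's per-position scan over the length-sorted name list (startswith each name) by a
-- hash-set of names plus a descending candidate-length loop bounded by the maximum name length
-- (objective: faster, asymptotic in the number of known names).

-- ===== PORT A =====
-- while-loop of _tokenize_segment, fuel = remaining positions (the loop advances ≥ 1 per
-- iteration on every input admitted by Pre_, so fuel = len(seg) suffices there);
-- 'for name in names_by_length: if seg[i:].startswith(name): … break' is List.find?;
-- seg[i:] with 0 ≤ i is seg.drop i (PySem.List.slice_from_natCast).
def pvSegLoopA (namesByLength : List String) (seg : List Char) : Nat → Nat → List String → List String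
  | 0, _, acc => acc
  | fuel+1, i, acc =>
    if h : i < seg.length then
      match namesByLength.find? (fun n => PySem.Chars.startswith (seg.drop i) n.toList) with
      | some n => pvSegLoopA namesByLength seg fuel (i + n.toList.length) (acc ++ [n])
      | none   => pvSegLoopA namesByLength seg fuel (i + 1) (acc ++ [String.ofList [seg[i]]])
    else acc

-- _tokenize_segment
def pvTokenizeSegA (seg : String) (known_names : Option (List String)) : List String :=
  let ns := known_names.getD []
  if ns.isEmpty || ns.all (fun n => PySem.Str.len n == 1) then
    seg.toList.map (fun c => String.ofList [c])
  else
    pvSegLoopA (PySem.List.sorted ns (fun n => PySem.Str.len n) true) seg.toList seg.toList.length 0 []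

def parse_path_string_py (path_str : String) (known_names : Option (List String)) : List (List String) :=
  if PySem.Str.isIn "|" path_str then
    let raw := (PySem.Str.split? path_str "|").getD []
    if PySem.Str.isIn "," path_str then
      raw.map (fun seg => (PySem.Str.split? seg ",").getD [])
    else
      raw.map (fun seg => seg.toList.map (fun c => String.ofList [c]))
  else if PySem.Str.isIn "," path_str then
    ((PySem.Str.split? path_str ",").getD []).map (fun seg => pvTokenizeSegA seg known_names)
  else
    [pvTokenizeSegA path_str known_names]

-- ===== PORT B =====
-- 'for l in range(min(maxlen, L-i), 0, -1): if seg[i:i+l] in names: … break / else:' —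
-- descending length scan; returns the length taken, none = no known name starts here.
def pvPickLen (names : PySem.Set String) (rest : List Char) : Nat → Option Nat
  | 0 => none
  | l+1 =>
    if PySem.Set.contains names (String.ofList (rest.take (l+1))) then some (l+1)
    else pvPickLen names rest l

-- while-loop of B's tokenizer (fuel as in A's port); seg[i:i+l] is (seg.drop i).take l.
def pvSegLoopB (names : PySem.Set String) (maxlen : Nat) (seg : List Char) : Nat → Nat → List String → List String
  | 0, _, acc => acc
  | fuel+1, i, acc =>
    if i < seg.length then
      match pvPickLen names (seg.drop i) (min maxlen (seg.length - i)) with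
      | some l => pvSegLoopB names maxlen seg fuel (i + l) (acc ++ [String.ofList ((seg.drop i).take l)])
      | none   => pvSegLoopB names maxlen seg fuel (i + 1) (acc ++ [String.ofList ((seg.drop i).take 1)])
    else acc

def parse_path_string_py_alt (path_str : String) (known_names : Option (List String)) : List (List String) :=
  if PySem.Str.isIn "|" path_str then
    let raw := (PySem.Str.split? path_str "|").getD []
    if PySem.Str.isIn "," path_str then
      raw.map (fun seg => (PySem.Str.split? seg ",").getD [])
    else
      raw.map (fun seg => seg.toList.map (fun c => String.ofList [c]))
  else
    let segments := if PySem.Str.isIn "," path_str then (PySem.Str.split? path_str ",").getD [] else [path_str]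
    match known_names with
    | none => segments.map (fun seg => seg.toList.map (fun c => String.ofList [c]))
    | some ks =>
      if ks.isEmpty then segments.map (fun seg => seg.toList.map (fun c => String.ofList [c]))
      else
        let names := PySem.Set.ofList ks
        let maxlen := ((PySem.List.max? (names.map (fun n => n.toList.length)) (fun x => x)).getD 0)
        segments.map (fun seg => pvSegLoopB names maxlen seg.toList seg.toList.length 0 [])

-- ===== PRECONDITION & SPEC =====
-- Pre_ excludes inputs without a pipe separator whose known_names contain the empty-string name:
-- there A's greedy while-loop can match the empty name without advancing and loop forever; on the
-- excluded inputs where A does return, A and B agree anyway (see claim cites).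
def Pre_parse_path_string_py (path_str : String) (known_names : Option (List String)) : Prop :=
  PySem.Str.isIn "|" path_str = true ∨ "" ∉ known_names.getD []
instance (path_str : String) (known_names : Option (List String)) : Decidable (Pre_parse_path_string_py path_str known_names) := by unfold Pre_parse_path_string_py; infer_instance

def pvWitness_parse_path_string_py : String × Option (List String) := ("GB_1M,GK", some ["G", "M", "K", "B_1"])

def Spec_parse_path_string_py (path_str : String) (known_names : Option (List String)) (out : List (List String)) : Prop := out = parse_path_string_py_alt path_str known_names
instance (path_str : String) (known_names : Option (List String)) (out : List (List String)) : Decidable (Spec_parse_path_string_py path_str known_names out) := by unfold Spec_parse_path_string_py; infer_instance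

-- ===== CLAIM (what is proved, stated in full; the proofs are below) =====
def Claim_equal_parse_path_string_py : Prop := ∀ (path_str : String) (known_names : Option (List String)), Dom_parse_path_string_py path_str known_names → Pre_parse_path_string_py path_str known_names → Spec_parse_path_string_py path_str known_names (parse_path_string_py path_str known_names)

-- ===== LEMMAS AND PROOFS =====

-- membership test B performs at position i for candidate length l
def pvMem (ks : List String) (rest : List Char) (l : Nat) : Prop :=
  PySem.Set.contains (PySem.Set.ofList ks) (String.ofList (rest.take l)) = true

theorem pvMem_iff (ks : List String) (rest : List Char) (l : Nat) :
    pvMem ks rest l ↔ String.ofList (rest.take l) ∈ ks := by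
  unfold pvMem PySem.Set.contains
  rw [List.contains_iff_mem, PySem.Set.mem_ofList]

theorem pvPickLen_eq_none_of (ks : List String) (rest : List Char) (k : Nat)
    (h : ∀ l, 1 ≤ l → l ≤ k → ¬ pvMem ks rest l) :
    pvPickLen (PySem.Set.ofList ks) rest k = none := by
  induction k with
  | zero => rfl
  | succ k ih =>
    have hk1 : ¬ pvMem ks rest (k+1) := h (k+1) (by omega) (by omega)
    unfold pvMem at hk1
    unfold pvPickLen
    rw [if_neg hk1]
    exact ih (fun l h1 h2 => h l h1 (by omega))

theorem pvPickLen_eq_some_of (ks : List String) (rest : List Char) (k l : Nat)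
    (h1 : 1 ≤ l) (h2 : l ≤ k) (h3 : pvMem ks rest l)
    (h4 : ∀ l', l < l' → l' ≤ k → ¬ pvMem ks rest l') :
    pvPickLen (PySem.Set.ofList ks) rest k = some l := by
  induction k with
  | zero => omega
  | succ k ih =>
    unfold pvPickLen
    by_cases hl : l = k + 1
    · subst hl
      unfold pvMem at h3
      rw [if_pos h3]
    · have hk1 : ¬ pvMem ks rest (k+1) := h4 (k+1) (by omega) (by omega)
      unfold pvMem at hk1
      rw [if_neg hk1]
      exact ih (by omega) (fun l' ha hb => h4 l' ha (by omega))

-- A's find? over the length-sorted list picks a maximal-length matching name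
theorem pvFindA_some (ks : List String) (rest : List Char) (n : String)
    (h : (PySem.List.sorted ks (fun n => PySem.Str.len n) true).find?
          (fun n => PySem.Chars.startswith rest n.toList) = some n) :
    n ∈ ks ∧ n.toList <+: rest ∧
      ∀ m ∈ ks, m.toList <+: rest → m.toList.length ≤ n.toList.length := by
  rw [List.find?_eq_some_iff_append] at h
  obtain ⟨hp, as, bs, heq, hfail⟩ := h
  have hmemn : n ∈ ks := by
    rw [← PySem.List.mem_sorted ks (fun n => PySem.Str.len n) true, heq]
    simp
  refine ⟨hmemn, (PySem.Chars.startswith_iff _ _).mp hp, ?_⟩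
  intro m hm hpre
  have hms : m ∈ as ++ n :: bs := by
    rw [← heq, PySem.List.mem_sorted]; exact hm
  rcases List.mem_append.mp hms with hma | hmb
  · exfalso
    have hb : PySem.Chars.startswith rest m.toList = false := by simpa using hfail m hma
    have := (PySem.Chars.startswith_iff rest m.toList).mpr hpre
    rw [hb] at this
    exact Bool.false_ne_true this
  · rcases List.mem_cons.mp hmb with hEq | hmb
    · subst hEq; exact le_refl _
    · have hpw := PySem.List.sorted_pairwise_rev ks (fun n => PySem.Str.len n)
      rw [heq, List.pairwise_append] at hpw
      have := (List.pairwise_cons.mp hpw.2.1).1 m hmb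
      simp only [PySem.Str.len_eq] at this
      exact_mod_cast this

theorem pvFindA_none (ks : List String) (rest : List Char)
    (h : (PySem.List.sorted ks (fun n => PySem.Str.len n) true).find?
          (fun n => PySem.Chars.startswith rest n.toList) = none) :
    ∀ m ∈ ks, ¬ m.toList <+: rest := by
  intro m hm
  rw [List.find?_eq_none] at h
  have hnp := h m ((PySem.List.mem_sorted ks (fun n => PySem.Str.len n) true m).mpr hm)
  intro hp
  exact hnp ((PySem.Chars.startswith_iff rest m.toList).mpr hp)

-- the maximum name length B precomputes bounds every known name
theorem pvMaxlen_le (ks : List String) (hne : ks ≠ []) :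
    ∀ m ∈ ks, m.toList.length ≤
      ((PySem.List.max? ((PySem.Set.ofList ks).map (fun n => n.toList.length)) (fun x => x)).getD 0) := by
  intro m hm
  obtain ⟨x, hx⟩ := ks.exists_mem_of_ne_nil hne
  have hxs : x ∈ PySem.Set.ofList ks := (PySem.Set.mem_ofList ks x).mpr hx
  have hnil : (PySem.Set.ofList ks).map (fun n => n.toList.length) ≠ [] := by
    intro hcon
    exact absurd (List.mem_map_of_mem hxs (f := fun n => n.toList.length)) (by rw [hcon]; simp)
  obtain ⟨v, hv⟩ : ∃ v, PySem.List.max? ((PySem.Set.ofList ks).map (fun n => n.toList.length)) (fun x => x) = some v := by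
    cases hmx : PySem.List.max? ((PySem.Set.ofList ks).map (fun n => n.toList.length)) (fun x => x) with
    | none => exact absurd ((PySem.List.max?_eq_none_iff _ _).mp hmx) hnil
    | some v => exact ⟨v, rfl⟩
  rw [hv]
  exact PySem.List.max?_isMax hv _
    (List.mem_map_of_mem ((PySem.Set.mem_ofList ks m).mpr hm) (f := fun n => n.toList.length))

-- core: under Pre_, A's greedy loop and B's set loop coincide step by step
theorem pvLoop_eq (ks : List String) (h0 : "" ∉ ks) (hne : ks ≠ []) (seg : List Char) :
    ∀ fuel i acc, seg.length ≤ fuel + i →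
      pvSegLoopA (PySem.List.sorted ks (fun n => PySem.Str.len n) true) seg fuel i acc =
      pvSegLoopB (PySem.Set.ofList ks)
        ((PySem.List.max? ((PySem.Set.ofList ks).map (fun n => n.toList.length)) (fun x => x)).getD 0)
        seg fuel i acc := by
  intro fuel
  induction fuel with
  | zero => intro i acc _; rfl
  | succ fuel ih =>
    intro i acc hfuel
    by_cases h : i < seg.length
    · have hrestlen : (seg.drop i).length = seg.length - i := List.length_drop
      cases hfind : (PySem.List.sorted ks (fun n => PySem.Str.len n) true).find?
          (fun n => PySem.Chars.startswith (seg.drop i) n.toList) with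
      | some n =>
        obtain ⟨hnks, hpre, hmax⟩ := pvFindA_some ks (seg.drop i) n hfind
        have hn1 : 1 ≤ n.toList.length := by
          rcases Nat.eq_zero_or_pos n.toList.length with h0' | h0'
          · exfalso
            have : n = "" := String.toList_inj.mp (List.eq_nil_of_length_eq_zero h0')
            exact h0 (this ▸ hnks)
          · exact h0'
        have hnle : n.toList.length ≤ (seg.drop i).length := hpre.length_le
        have hpick : pvPickLen (PySem.Set.ofList ks) (seg.drop i)
            (min ((PySem.List.max? ((PySem.Set.ofList ks).map (fun n => n.toList.length)) (fun x => x)).getD 0) (seg.length - i)) = some n.toList.length := by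
          apply pvPickLen_eq_some_of ks _ _ _ hn1
          · have := pvMaxlen_le ks hne n hnks
            omega
          · rw [pvMem_iff]
            have ht : (seg.drop i).take n.toList.length = n.toList :=
              (List.prefix_iff_eq_take.mp hpre).symm
            rw [ht]
            have hofl : String.ofList n.toList = n := String.toList_inj.mp String.toList_ofList
            rw [hofl]; exact hnks
          · intro l' hgt hle hmem
            rw [pvMem_iff] at hmem
            have hlen' : (String.ofList ((seg.drop i).take l')).toList.length = l' := by
              rw [String.toList_ofList, List.length_take]
              omega
            have hpre' : (String.ofList ((seg.drop i).take l')).toList <+: seg.drop i := by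
              rw [String.toList_ofList]; exact List.take_prefix _ _
            have := hmax _ hmem hpre'
            omega
        have htok : String.ofList ((seg.drop i).take n.toList.length) = n := by
          rw [(List.prefix_iff_eq_take.mp hpre).symm]
          exact String.toList_inj.mp String.toList_ofList
        have eqA : pvSegLoopA (PySem.List.sorted ks (fun n => PySem.Str.len n) true) seg (fuel+1) i acc =
            pvSegLoopA (PySem.List.sorted ks (fun n => PySem.Str.len n) true) seg fuel (i + n.toList.length) (acc ++ [n]) := by
          conv_lhs => unfold pvSegLoopA
          rw [dif_pos h, hfind]
        have eqB : pvSegLoopB (PySem.Set.ofList ks)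
              ((PySem.List.max? ((PySem.Set.ofList ks).map (fun n => n.toList.length)) (fun x => x)).getD 0)
              seg (fuel+1) i acc =
            pvSegLoopB (PySem.Set.ofList ks)
              ((PySem.List.max? ((PySem.Set.ofList ks).map (fun n => n.toList.length)) (fun x => x)).getD 0)
              seg fuel (i + n.toList.length) (acc ++ [n]) := by
          conv_lhs => unfold pvSegLoopB
          rw [if_pos h, hpick]
          show pvSegLoopB (PySem.Set.ofList ks)
              ((PySem.List.max? ((PySem.Set.ofList ks).map (fun n => n.toList.length)) (fun x => x)).getD 0)
              seg fuel (i + n.toList.length) (acc ++ [String.ofList ((seg.drop i).take n.toList.length)]) = _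
          rw [htok]
        rw [eqA, eqB]
        exact ih (i + n.toList.length) (acc ++ [n]) (by omega)
      | none =>
        have hnone := pvFindA_none ks (seg.drop i) hfind
        have hpick : pvPickLen (PySem.Set.ofList ks) (seg.drop i)
            (min ((PySem.List.max? ((PySem.Set.ofList ks).map (fun n => n.toList.length)) (fun x => x)).getD 0) (seg.length - i)) = none := by
          apply pvPickLen_eq_none_of
          intro l h1 h2 hmem
          rw [pvMem_iff] at hmem
          exact hnone _ hmem (by rw [String.toList_ofList]; exact List.take_prefix _ _)
        have htok : (seg.drop i).take 1 = [seg[i]] := by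
          rw [List.drop_eq_getElem_cons h]; rfl
        have eqA : pvSegLoopA (PySem.List.sorted ks (fun n => PySem.Str.len n) true) seg (fuel+1) i acc =
            pvSegLoopA (PySem.List.sorted ks (fun n => PySem.Str.len n) true) seg fuel (i + 1) (acc ++ [String.ofList [seg[i]]]) := by
          conv_lhs => unfold pvSegLoopA
          rw [dif_pos h, hfind]
        have eqB : pvSegLoopB (PySem.Set.ofList ks)
              ((PySem.List.max? ((PySem.Set.ofList ks).map (fun n => n.toList.length)) (fun x => x)).getD 0)
              seg (fuel+1) i acc =
            pvSegLoopB (PySem.Set.ofList ks)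
              ((PySem.List.max? ((PySem.Set.ofList ks).map (fun n => n.toList.length)) (fun x => x)).getD 0)
              seg fuel (i + 1) (acc ++ [String.ofList [seg[i]]]) := by
          conv_lhs => unfold pvSegLoopB
          rw [if_pos h, hpick]
          show pvSegLoopB (PySem.Set.ofList ks)
              ((PySem.List.max? ((PySem.Set.ofList ks).map (fun n => n.toList.length)) (fun x => x)).getD 0)
              seg fuel (i + 1) (acc ++ [String.ofList ((seg.drop i).take 1)]) = _
          rw [htok]
        rw [eqA, eqB]
        exact ih (i + 1) (acc ++ [String.ofList [seg[i]]]) (by omega)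
    · unfold pvSegLoopA pvSegLoopB
      rw [dif_neg h, if_neg h]

-- when every known name has length 1, B's loop is the character split
theorem pvLoopB_maxlen_one (names : PySem.Set String) (seg : List Char) :
    ∀ fuel i acc, seg.length ≤ fuel + i →
      pvSegLoopB names 1 seg fuel i acc = acc ++ (seg.drop i).map (fun c => String.ofList [c]) := by
  intro fuel
  induction fuel with
  | zero =>
    intro i acc hf
    have hd : seg.drop i = [] := List.drop_eq_nil_of_le (by omega)
    simp [pvSegLoopB, hd]
  | succ fuel ih =>
    intro i acc hf
    by_cases h : i < seg.length
    · have hmin : min 1 (seg.length - i) = 1 := by omega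
      have htok : (seg.drop i).take 1 = [seg[i]] := by
        rw [List.drop_eq_getElem_cons h]; rfl
      have hdrop : seg.drop i = seg[i] :: seg.drop (i + 1) := List.drop_eq_getElem_cons h
      have hstep : pvSegLoopB names 1 seg (fuel+1) i acc =
          pvSegLoopB names 1 seg fuel (i + 1) (acc ++ [String.ofList [seg[i]]]) := by
        conv_lhs => unfold pvSegLoopB
        rw [if_pos h, hmin]
        unfold pvPickLen
        by_cases hm : PySem.Set.contains names (String.ofList ((seg.drop i).take (0+1))) = true
        · rw [if_pos hm]
          show pvSegLoopB names 1 seg fuel (i + (0+1)) (acc ++ [String.ofList ((seg.drop i).take (0+1))]) = _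
          rw [show (0:Nat)+1 = 1 from rfl, htok]
        · rw [if_neg hm]
          show pvSegLoopB names 1 seg fuel (i + 1) (acc ++ [String.ofList ((seg.drop i).take 1)]) = _
          rw [htok]
      rw [hstep, ih (i + 1) _ (by omega), hdrop]
      simp only [List.map_cons, List.append_assoc, List.singleton_append]
    · have hd : seg.drop i = [] := List.drop_eq_nil_of_le (by omega)
      unfold pvSegLoopB
      rw [if_neg h, hd]
      simp

-- if every name in a nonempty ks has length 1, B's precomputed maxlen is 1
theorem pvMaxlen_one (ks : List String) (hne : ks ≠ [])
    (hall : ks.all (fun n => PySem.Str.len n == 1) = true) :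
    ((PySem.List.max? ((PySem.Set.ofList ks).map (fun n => n.toList.length)) (fun x => x)).getD 0) = 1 := by
  obtain ⟨x, hx⟩ := ks.exists_mem_of_ne_nil hne
  have hxs : x ∈ PySem.Set.ofList ks := (PySem.Set.mem_ofList ks x).mpr hx
  have hnil : (PySem.Set.ofList ks).map (fun n => n.toList.length) ≠ [] := by
    intro hcon
    exact absurd (List.mem_map_of_mem hxs (f := fun n => n.toList.length)) (by rw [hcon]; simp)
  obtain ⟨v, hv⟩ : ∃ v, PySem.List.max? ((PySem.Set.ofList ks).map (fun n => n.toList.length)) (fun x => x) = some v := by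
    cases hmx : PySem.List.max? ((PySem.Set.ofList ks).map (fun n => n.toList.length)) (fun x => x) with
    | none => exact absurd ((PySem.List.max?_eq_none_iff _ _).mp hmx) hnil
    | some v => exact ⟨v, rfl⟩
  rw [hv, Option.getD_some]
  have hv1 : ∀ y ∈ (PySem.Set.ofList ks).map (fun n => n.toList.length), y = 1 := by
    intro y hy
    obtain ⟨m, hm, hym⟩ := List.mem_map.mp hy
    have hmks : m ∈ ks := (PySem.Set.mem_ofList ks m).mp hm
    have := List.all_eq_true.mp hall m hmks
    have hlen : PySem.Str.len m = 1 := by simpa using this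
    rw [PySem.Str.len_eq] at hlen
    omega
  exact hv1 v (PySem.List.max?_mem hv)

-- per-segment equality: A's _tokenize_segment equals B's set loop (nonempty ks, '' ∉ ks)
theorem pvTok_eq (seg : String) (ks : List String) (h0 : "" ∉ ks) (hne : ks ≠ []) :
    pvTokenizeSegA seg (some ks) =
      pvSegLoopB (PySem.Set.ofList ks)
        ((PySem.List.max? ((PySem.Set.ofList ks).map (fun n => n.toList.length)) (fun x => x)).getD 0)
        seg.toList seg.toList.length 0 [] := by
  unfold pvTokenizeSegA
  simp only [Option.getD_some]
  have hnotE : ks.isEmpty = false := by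
    cases ks with
    | nil => exact absurd rfl hne
    | cons a t => rfl
  by_cases hall : ks.all (fun n => PySem.Str.len n == 1) = true
  · rw [if_pos (by rw [hnotE, hall]; rfl)]
    rw [pvMaxlen_one ks hne hall]
    rw [pvLoopB_maxlen_one _ _ _ 0 [] (by omega)]
    simp
  · rw [if_neg (by rw [hnotE]; simpa using hall)]
    exact pvLoop_eq ks h0 hne seg.toList seg.toList.length 0 [] (by omega)

-- charsplit case: A's _tokenize_segment with no usable names is the character split
theorem pvTok_charsplit (seg : String) (known_names : Option (List String))
    (h : (known_names.getD []).isEmpty = true) :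
    pvTokenizeSegA seg known_names = seg.toList.map (fun c => String.ofList [c]) := by
  unfold pvTokenizeSegA
  rw [if_pos (by rw [h]; rfl)]

-- ===== VERDICT (by name: the statement is the Claim_ definition above) =====
theorem parse_path_string_py_spec : Claim_equal_parse_path_string_py := by
  unfold Claim_equal_parse_path_string_py
  intro path_str known_names _ hpre
  unfold Spec_parse_path_string_py parse_path_string_py parse_path_string_py_alt
  by_cases hbar : PySem.Str.isIn "|" path_str = true
  · rw [if_pos hbar, if_pos hbar]
  · rw [if_neg hbar, if_neg hbar]
    unfold Pre_parse_path_string_py at hpre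
    have hpre' : "" ∉ known_names.getD [] := by
      rcases hpre with hb | hn
      · exact absurd hb hbar
      · exact hn
    cases known_names with
    | none =>
      simp only []
      by_cases hc : PySem.Str.isIn "," path_str = true
      · rw [if_pos hc, if_pos hc]
        exact List.map_congr_left (fun seg _ => pvTok_charsplit seg none rfl)
      · rw [if_neg hc, if_neg hc]
        simp [pvTok_charsplit _ none rfl]
    | some ks =>
      cases hks : ks.isEmpty with
      | true =>
        have hksnil : ks = [] := List.isEmpty_iff.mp hks
        subst hksnil
        simp only []
        by_cases hc : PySem.Str.isIn "," path_str = true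
        · rw [if_pos hc, if_pos hc]
          exact List.map_congr_left (fun seg _ => pvTok_charsplit seg (some []) rfl)
        · rw [if_neg hc, if_neg hc]
          simp [pvTok_charsplit _ (some []) rfl]
      | false =>
        have hne : ks ≠ [] := by
          intro hcon; subst hcon; exact absurd hks (by decide)
        have h0 : "" ∉ ks := by simpa using hpre'
        simp only [hks, Bool.false_eq_true, if_false]
        by_cases hc : PySem.Str.isIn "," path_str = true
        · rw [if_pos hc, if_pos hc]
          exact List.map_congr_left (fun seg _ => pvTok_eq seg ks h0 hne)
        · rw [if_neg hc, if_neg hc]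
          simp only [List.map_cons, List.map_nil]
          rw [pvTok_eq path_str ks h0 hne]
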